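-- pv_equiv track=rewrite | github.com/Rene8028/Alevel_9618_paper4 | 2022/9618_41_ON_22/9618_41_ON_22_Q3.py | SearchValue
-- ===== SOURCE A (Python) =====
-- ArrayNodes = [[1,20,5],[2,15,-1],[-1,3,3],[-1,9,4],[-1,10,-1],[-1,58,-1],[-1,-1,-1]]
--
-- def SearchValue(Root, ValueToFind):
--     if Root == -1:
--         return -1
--     else:
--         if ArrayNodes[Root][1] == ValueToFind:
--             return Root
--         else:
--             if ArrayNodes[Root][1] == -1:
--                 return -1
--     if ArrayNodes[Root][1] > ValueToFind:
--         return SearchValue(ArrayNodes[Root][0], ValueToFind)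
--     if ArrayNodes[Root][1] < ValueToFind:
--         return SearchValue(ArrayNodes[Root][2], ValueToFind)
-- ===== SOURCE B (Python) =====
-- ArrayNodes = [[1,20,5],[2,15,-1],[-1,3,3],[-1,9,4],[-1,10,-1],[-1,58,-1],[-1,-1,-1]]
--
-- def SearchValue(Root, ValueToFind):
--     # Exhaustive stack-based DFS of the subtree rooted at Root: because the fixed
--     # table is a binary search tree with pairwise-distinct values, the node found
--     # by a full subtree scan is exactly the one the comparison-guided descent finds.
--     stack = [Root]
--     while stack:
--         i = stack.pop()
--         if i != -1:
--             left, value, right = ArrayNodes[i]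
--             if value == ValueToFind:
--                 return i
--             stack.append(left)
--             stack.append(right)
--     return -1
-- ===== Notes on version B (the rewrite author's own statement) =====
-- stated objective: alternative
-- what changed: Replaced the comparison-guided recursive descent by an exhaustive stack-based DFS of the subtree that scans every node for the value; this is equivalent because the fixed table is a binary search tree with pairwise-distinct values.
import Mathlib
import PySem

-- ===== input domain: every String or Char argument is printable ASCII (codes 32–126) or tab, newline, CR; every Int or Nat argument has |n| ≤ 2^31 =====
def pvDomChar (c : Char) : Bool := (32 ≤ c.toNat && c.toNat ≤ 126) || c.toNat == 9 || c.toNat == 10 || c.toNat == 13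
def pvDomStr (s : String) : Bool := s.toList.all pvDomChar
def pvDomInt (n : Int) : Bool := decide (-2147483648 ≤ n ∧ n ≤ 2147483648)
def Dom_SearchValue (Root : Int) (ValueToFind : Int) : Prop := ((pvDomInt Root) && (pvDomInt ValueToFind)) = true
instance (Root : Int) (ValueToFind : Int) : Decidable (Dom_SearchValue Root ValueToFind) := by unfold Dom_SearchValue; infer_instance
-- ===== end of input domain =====

-- B replaces A's comparison-guided descent by an exhaustive stack-based DFS of the subtree; equivalent because the fixed table is a BST with distinct values.
-- The module-level table ArrayNodes, shared by both programs:
def arrayNodes : List (Int × Int × Int) :=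
  [(1,20,5),(2,15,-1),(-1,3,3),(-1,9,4),(-1,10,-1),(-1,58,-1),(-1,-1,-1)]

-- ===== PORT A =====
-- A's recursion, made total with fuel; fuel 8 exceeds any chain in the 7-node table, so
-- the fuel-0 branch is never reached on inputs of Pre_.
def searchValueRecA (fuel : Nat) (Root : Int) (ValueToFind : Int) : Int :=
  match fuel with
  | 0 => -1
  | fuel + 1 =>
    if Root = -1 then -1
    else
      match PySem.List.pyGet? arrayNodes Root with
      | none => -1   -- IndexError in Python; excluded by Pre_
      | some (l, v, r) =>
        if v = ValueToFind then Root
        else if v = -1 then -1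
        else if v > ValueToFind then searchValueRecA fuel l ValueToFind
        else if v < ValueToFind then searchValueRecA fuel r ValueToFind
        else -1      -- unreachable: v ≠ ValueToFind excludes v = ValueToFind here

def SearchValue (Root : Int) (ValueToFind : Int) : Int :=
  searchValueRecA 8 Root ValueToFind

-- ===== PORT B =====
-- B's while-loop over an explicit stack (top of stack = head of list; Python pushes
-- left then right, so pop yields right first: new stack is right :: left :: rest).
-- Fuel 32 exceeds the number of loop iterations possible on the 7-node table.
def searchStackB (fuel : Nat) (stack : List Int) (ValueToFind : Int) : Int :=
  match fuel with
  | 0 => -1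
  | fuel + 1 =>
    match stack with
    | [] => -1
    | i :: rest =>
      if i = -1 then searchStackB fuel rest ValueToFind
      else
        match PySem.List.pyGet? arrayNodes i with
        | none => -1   -- IndexError in Python; excluded by Pre_
        | some (l, v, r) =>
          if v = ValueToFind then i
          else searchStackB fuel (r :: l :: rest) ValueToFind

def SearchValue_alt (Root : Int) (ValueToFind : Int) : Int :=
  searchStackB 32 [Root] ValueToFind

-- ===== PRECONDITION & SPEC =====
-- Pre_ excludes exactly the initial Root values on which Python's ArrayNodes[Root] raises IndexError.
def Pre_SearchValue (Root : Int) (ValueToFind : Int) : Prop := -7 ≤ Root ∧ Root ≤ 6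
instance (Root : Int) (ValueToFind : Int) : Decidable (Pre_SearchValue Root ValueToFind) := by
  unfold Pre_SearchValue; infer_instance
def pvWitness_SearchValue : Int × Int := (0, 9)

def Spec_SearchValue (Root : Int) (ValueToFind : Int) (out : Int) : Prop := out = SearchValue_alt Root ValueToFind
instance (Root : Int) (ValueToFind : Int) (out : Int) : Decidable (Spec_SearchValue Root ValueToFind out) := by unfold Spec_SearchValue; infer_instance

-- ===== CLAIM (what is proved, stated in full; the proofs are below) =====
def Claim_equal_SearchValue : Prop := ∀ (Root : Int) (ValueToFind : Int), Dom_SearchValue Root ValueToFind → Pre_SearchValue Root ValueToFind → Spec_SearchValue Root ValueToFind (SearchValue Root ValueToFind)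

-- ===== LEMMAS AND PROOFS =====
set_option maxHeartbeats 1600000

-- Ground evaluations of the table lookup at every index the two programs can reach.
theorem pvGet_m7 : PySem.List.pyGet? arrayNodes (-7 : Int) = some (1,20,5) := by decide
theorem pvGet_m6 : PySem.List.pyGet? arrayNodes (-6 : Int) = some (2,15,-1) := by decide
theorem pvGet_m5 : PySem.List.pyGet? arrayNodes (-5 : Int) = some (-1,3,3) := by decide
theorem pvGet_m4 : PySem.List.pyGet? arrayNodes (-4 : Int) = some (-1,9,4) := by decide
theorem pvGet_m3 : PySem.List.pyGet? arrayNodes (-3 : Int) = some (-1,10,-1) := by decide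
theorem pvGet_m2 : PySem.List.pyGet? arrayNodes (-2 : Int) = some (-1,58,-1) := by decide
theorem pvGet_0 : PySem.List.pyGet? arrayNodes (0 : Int) = some (1,20,5) := by decide
theorem pvGet_1 : PySem.List.pyGet? arrayNodes (1 : Int) = some (2,15,-1) := by decide
theorem pvGet_2 : PySem.List.pyGet? arrayNodes (2 : Int) = some (-1,3,3) := by decide
theorem pvGet_3 : PySem.List.pyGet? arrayNodes (3 : Int) = some (-1,9,4) := by decide
theorem pvGet_4 : PySem.List.pyGet? arrayNodes (4 : Int) = some (-1,10,-1) := by decide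
theorem pvGet_5 : PySem.List.pyGet? arrayNodes (5 : Int) = some (-1,58,-1) := by decide
theorem pvGet_6 : PySem.List.pyGet? arrayNodes (6 : Int) = some (-1,-1,-1) := by decide

-- When ValueToFind is none of the seven table values, B's DFS finds nothing
-- (fuel induction with the invariant that every stacked index lies in [-7,6]).
theorem searchStackB_notfound (V : Int)
    (h20 : V ≠ 20) (h15 : V ≠ 15) (h3 : V ≠ 3) (h9 : V ≠ 9) (h10 : V ≠ 10)
    (h58 : V ≠ 58) (hm1 : V ≠ -1) :
    ∀ (fuel : Nat) (stack : List Int), (∀ i ∈ stack, -7 ≤ i ∧ i ≤ 6) →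
      searchStackB fuel stack V = -1 := by
  intro fuel
  induction fuel with
  | zero => intro stack _; rfl
  | succ n ih =>
    intro stack h
    match stack with
    | [] => rfl
    | i :: rest =>
      obtain ⟨hi1, hi2⟩ := h i (List.mem_cons_self ..)
      have hrest : ∀ j ∈ rest, -7 ≤ j ∧ j ≤ 6 := fun j hj => h j (List.mem_cons_of_mem _ hj)
      interval_cases i <;>
        simp only [searchStackB, pvGet_m7, pvGet_m6, pvGet_m5, pvGet_m4, pvGet_m3, pvGet_m2,
          pvGet_0, pvGet_1, pvGet_2, pvGet_3, pvGet_4, pvGet_5, pvGet_6] <;>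
        norm_num [Ne.symm h20, Ne.symm h15, Ne.symm h3, Ne.symm h9, Ne.symm h10,
          Ne.symm h58, Ne.symm hm1] <;>
        first
          | exact ih rest hrest
          | (apply ih
             intro j hj
             simp only [List.mem_cons] at hj
             rcases hj with rfl | rfl | hj
             · constructor <;> norm_num
             · constructor <;> norm_num
             · exact hrest j hj)

-- When ValueToFind is none of the seven table values, A's descent falls off to -1
-- (fuel induction; children indices stay in [-7,6]).
theorem searchValueRecA_notfound (V : Int)
    (h20 : V ≠ 20) (h15 : V ≠ 15) (h3 : V ≠ 3) (h9 : V ≠ 9) (h10 : V ≠ 10)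
    (h58 : V ≠ 58) (hm1 : V ≠ -1) :
    ∀ (fuel : Nat) (R : Int), -7 ≤ R → R ≤ 6 →
      searchValueRecA fuel R V = -1 := by
  intro fuel
  induction fuel with
  | zero => intro R _ _; rfl
  | succ n ih =>
    intro R h1 h2
    interval_cases R <;>
      simp only [searchValueRecA, pvGet_m7, pvGet_m6, pvGet_m5, pvGet_m4, pvGet_m3, pvGet_m2,
        pvGet_0, pvGet_1, pvGet_2, pvGet_3, pvGet_4, pvGet_5, pvGet_6] <;>
      norm_num [Ne.symm h20, Ne.symm h15, Ne.symm h3, Ne.symm h9, Ne.symm h10,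
        Ne.symm h58, Ne.symm hm1] <;>
      split_ifs <;>
      first
        | rfl
        | exact ih _ (by norm_num) (by norm_num)

theorem searchValue_eq_of_pre (Root ValueToFind : Int)
    (h1 : -7 ≤ Root) (h2 : Root ≤ 6) :
    SearchValue Root ValueToFind = SearchValue_alt Root ValueToFind := by
  unfold SearchValue SearchValue_alt
  by_cases e20 : ValueToFind = 20
  · subst e20; interval_cases Root <;> decide
  · by_cases e15 : ValueToFind = 15
    · subst e15; interval_cases Root <;> decide
    · by_cases e3 : ValueToFind = 3
      · subst e3; interval_cases Root <;> decide
      · by_cases e9 : ValueToFind = 9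
        · subst e9; interval_cases Root <;> decide
        · by_cases e10 : ValueToFind = 10
          · subst e10; interval_cases Root <;> decide
          · by_cases e58 : ValueToFind = 58
            · subst e58; interval_cases Root <;> decide
            · by_cases em1 : ValueToFind = -1
              · subst em1; interval_cases Root <;> decide
              · rw [searchValueRecA_notfound ValueToFind e20 e15 e3 e9 e10 e58 em1 8 Root h1 h2,
                    searchStackB_notfound ValueToFind e20 e15 e3 e9 e10 e58 em1 32 [Root]
                      (by intro j hj; simp only [List.mem_cons, List.not_mem_nil, or_false] at hj;
                          subst hj; exact ⟨h1, h2⟩)]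

-- ===== VERDICT (by name: the statement is the Claim_ definition above) =====
theorem SearchValue_spec : Claim_equal_SearchValue := by
  intro R V _ hPre
  exact searchValue_eq_of_pre R V hPre.1 hPre.2
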